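-- pv_equiv track=rewrite | github.com/hokiattila/Malom_Game_NJE | engine/player/astar_player.py | _would_complete_mill
-- ===== SOURCE A (Python) =====
-- from typing import List, Tuple, Union
--
-- def _would_complete_mill(board: List[str], position: int, color: str) -> bool:
--     # Check if placing a piece at 'position' will complete a mill for 'color'
--     mills = [
--         [0, 1, 2], [3, 4, 5], [6, 7, 8], [9, 10, 11], [12, 13, 14], [15, 16, 17], [18, 19, 20], [21, 22, 23],
--         [0, 9, 21], [3, 10, 18], [6, 11, 15], [1, 4, 7], [16, 19, 22], [8, 12, 17], [5, 13, 20], [2, 14, 23]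
--     ]
--
--     for mill in mills:
--         if position in mill and all(board[i] == color or i == position for i in mill):
--             return True
--     return False
-- ===== SOURCE B (Python) =====
-- from typing import List
--
-- _MILLS = [
--     [0, 1, 2], [3, 4, 5], [6, 7, 8], [9, 10, 11], [12, 13, 14], [15, 16, 17], [18, 19, 20], [21, 22, 23],
--     [0, 9, 21], [3, 10, 18], [6, 11, 15], [1, 4, 7], [16, 19, 22], [8, 12, 17], [5, 13, 20], [2, 14, 23]
-- ]
--
--
-- def _build_index():
--     # position -> list of mills containing it, in the original mill order
--     idx = {}
--     for mill in _MILLS: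
--         for p in mill:
--             idx.setdefault(p, []).append(mill)
--     return idx
--
--
-- _MILL_INDEX = _build_index()
--
--
-- def _would_complete_mill(board: List[str], position: int, color: str) -> bool:
--     return any(
--         all(board[i] == color or i == position for i in mill)
--         for mill in _MILL_INDEX.get(position, [])
--     )
-- ===== Notes on version B (the rewrite author's own statement) =====
-- stated objective: simpler
-- what changed: B precomputes a position->mills index once (iterating the 16 mills) and the function body becomes a single any() over only the (at most two) mills containing the position, replacing A's scan over all 16 mills with a membership guard.
-- outside the precondition, e.g. on _would_complete_mill(['w', 'w', 'w'], 0, 'w'): A returns True, B returns True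
import Mathlib
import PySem

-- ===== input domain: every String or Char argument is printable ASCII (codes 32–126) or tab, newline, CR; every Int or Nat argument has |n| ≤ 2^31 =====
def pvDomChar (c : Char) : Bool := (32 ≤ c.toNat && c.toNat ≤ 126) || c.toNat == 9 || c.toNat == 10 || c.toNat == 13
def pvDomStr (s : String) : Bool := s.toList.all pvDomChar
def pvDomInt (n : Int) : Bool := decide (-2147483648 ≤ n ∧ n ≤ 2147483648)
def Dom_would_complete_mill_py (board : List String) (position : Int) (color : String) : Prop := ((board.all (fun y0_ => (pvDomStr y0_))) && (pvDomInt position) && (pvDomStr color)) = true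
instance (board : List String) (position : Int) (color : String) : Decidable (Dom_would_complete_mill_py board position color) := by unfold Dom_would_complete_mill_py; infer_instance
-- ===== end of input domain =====

-- ===== PORT A =====
-- B replaces A's scan over all 16 mills (with a membership guard) by a precomputed
-- position -> mills index built once; objective: simpler/alternative, same results.
-- board[i] is ported as pyGetD with default "" — exact under Pre_ (every index the
-- Python actually evaluates is then in range).

def pvMills : List (List Int) :=
  [[0, 1, 2], [3, 4, 5], [6, 7, 8], [9, 10, 11], [12, 13, 14], [15, 16, 17], [18, 19, 20], [21, 22, 23],
   [0, 9, 21], [3, 10, 18], [6, 11, 15], [1, 4, 7], [16, 19, 22], [8, 12, 17], [5, 13, 20], [2, 14, 23]]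

def pvLoopA (board : List String) (position : Int) (color : String) : List (List Int) → Bool
  | [] => false
  | mill :: rest =>
    if mill.contains position &&
        mill.all (fun i => (PySem.List.pyGetD board i "" == color) || (i == position)) then
      true
    else
      pvLoopA board position color rest

def would_complete_mill_py (board : List String) (position : Int) (color : String) : Bool :=
  pvLoopA board position color pvMills

-- ===== PORT B =====
-- idx.setdefault(p, []).append(mill) is ported as modify p [] (· ++ [mill]) (append to the
-- list stored at p, starting from [] when p is fresh) — the same dict update.
def pvMillIndex : PySem.Dict Int (List (List Int)) :=
  pvMills.foldl
    (fun idx mill => mill.foldl (fun idx p => idx.modify p [] (· ++ [mill])) idx)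
    PySem.Dict.empty

def would_complete_mill_py_alt (board : List String) (position : Int) (color : String) : Bool :=
  (pvMillIndex.getD position []).any
    (fun mill => mill.all (fun i => (PySem.List.pyGetD board i "" == color) || (i == position)))

-- ===== PRECONDITION & SPEC =====
-- Pre_ excludes boards shorter than 24 when 0 <= position < 24: there A's scan indexes
-- board out of range and raises IndexError on almost all such inputs (it can return only
-- when an early mill happens to match before an out-of-range index is touched).
def Pre_would_complete_mill_py (board : List String) (position : Int) (color : String) : Prop :=
  (0 ≤ position ∧ position < 24) → 24 ≤ board.length
instance (board : List String) (position : Int) (color : String) : Decidable (Pre_would_complete_mill_py board position color) := by unfold Pre_would_complete_mill_py; infer_instance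

def pvWitness_would_complete_mill_py : List String × Int × String :=
  (["w", "w", "", "b", "", "", "", "", "", "w", "", "", "", "", "", "", "", "", "", "", "", "w", "", ""] , 0, "w")

def Spec_would_complete_mill_py (board : List String) (position : Int) (color : String) (out : Bool) : Prop := out = would_complete_mill_py_alt board position color
instance (board : List String) (position : Int) (color : String) (out : Bool) : Decidable (Spec_would_complete_mill_py board position color out) := by unfold Spec_would_complete_mill_py; infer_instance

-- ===== CLAIM (what is proved, stated in full; the proofs are below) =====
def Claim_equal_would_complete_mill_py : Prop := ∀ (board : List String) (position : Int) (color : String), Dom_would_complete_mill_py board position color → Pre_would_complete_mill_py board position color → Spec_would_complete_mill_py board position color (would_complete_mill_py board position color)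

-- ===== LEMMAS AND PROOFS =====

set_option maxRecDepth 4096 in
theorem pvMillIndex_eq : pvMillIndex = PySem.Dict.mk [((0 : Int),  [[0, 1, 2], [0, 9, 21]]), ((1 : Int),  [[0, 1, 2], [1, 4, 7]]), ((2 : Int),  [[0, 1, 2], [2, 14, 23]]), ((3 : Int),  [[3, 4, 5], [3, 10, 18]]), ((4 : Int),  [[3, 4, 5], [1, 4, 7]]), ((5 : Int),  [[3, 4, 5], [5, 13, 20]]), ((6 : Int),  [[6, 7, 8], [6, 11, 15]]), ((7 : Int),  [[6, 7, 8], [1, 4, 7]]), ((8 : Int),  [[6, 7, 8], [8, 12, 17]]), ((9 : Int),  [[9, 10, 11], [0, 9, 21]]), ((10 : Int),  [[9, 10, 11], [3, 10, 18]]), ((11 : Int),  [[9, 10, 11], [6, 11, 15]]), ((12 : Int),  [[12, 13, 14], [8, 12, 17]]), ((13 : Int),  [[12, 13, 14], [5, 13, 20]]), ((14 : Int),  [[12, 13, 14], [2, 14, 23]]), ((15 : Int),  [[15, 16, 17], [6, 11, 15]]), ((16 : Int),  [[15, 16, 17], [16, 19, 22]]), ((17 : Int),  [[15, 16, 17], [8,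 12, 17]]), ((18 : Int),  [[18, 19, 20], [3, 10, 18]]), ((19 : Int),  [[18, 19, 20], [16, 19, 22]]), ((20 : Int),  [[18, 19, 20], [5, 13, 20]]), ((21 : Int),  [[21, 22, 23], [0, 9, 21]]), ((22 : Int),  [[21, 22, 23], [16, 19, 22]]), ((23 : Int),  [[21, 22, 23], [2, 14, 23]])] := by rfl

theorem pv_out_of_range (board : List String) (position : Int) (color : String)
    (h : ¬ (0 ≤ position ∧ position < 24)) :
    would_complete_mill_py board position color = would_complete_mill_py_alt board position color := by
  have a0 : position ≠ (0 : Int) := by omega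
  have b0 : ((0 : Int)) ≠ position := by omega
  have a1 : position ≠ (1 : Int) := by omega
  have b1 : ((1 : Int)) ≠ position := by omega
  have a2 : position ≠ (2 : Int) := by omega
  have b2 : ((2 : Int)) ≠ position := by omega
  have a3 : position ≠ (3 : Int) := by omega
  have b3 : ((3 : Int)) ≠ position := by omega
  have a4 : position ≠ (4 : Int) := by omega
  have b4 : ((4 : Int)) ≠ position := by omega
  have a5 : position ≠ (5 : Int) := by omega
  have b5 : ((5 : Int)) ≠ position := by omega
  have a6 : position ≠ (6 : Int) := by omega
  have b6 : ((6 : Int)) ≠ position := by omega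
  have a7 : position ≠ (7 : Int) := by omega
  have b7 : ((7 : Int)) ≠ position := by omega
  have a8 : position ≠ (8 : Int) := by omega
  have b8 : ((8 : Int)) ≠ position := by omega
  have a9 : position ≠ (9 : Int) := by omega
  have b9 : ((9 : Int)) ≠ position := by omega
  have a10 : position ≠ (10 : Int) := by omega
  have b10 : ((10 : Int)) ≠ position := by omega
  have a11 : position ≠ (11 : Int) := by omega
  have b11 : ((11 : Int)) ≠ position := by omega
  have a12 : position ≠ (12 : Int) := by omega
  have b12 : ((12 : Int)) ≠ position := by omega
  have a13 : position ≠ (13 : Int) := by omega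
  have b13 : ((13 : Int)) ≠ position := by omega
  have a14 : position ≠ (14 : Int) := by omega
  have b14 : ((14 : Int)) ≠ position := by omega
  have a15 : position ≠ (15 : Int) := by omega
  have b15 : ((15 : Int)) ≠ position := by omega
  have a16 : position ≠ (16 : Int) := by omega
  have b16 : ((16 : Int)) ≠ position := by omega
  have a17 : position ≠ (17 : Int) := by omega
  have b17 : ((17 : Int)) ≠ position := by omega
  have a18 : position ≠ (18 : Int) := by omega
  have b18 : ((18 : Int)) ≠ position := by omega
  have a19 : position ≠ (19 : Int) := by omega
  have b19 : ((19 : Int)) ≠ position := by omega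
  have a20 : position ≠ (20 : Int) := by omega
  have b20 : ((20 : Int)) ≠ position := by omega
  have a21 : position ≠ (21 : Int) := by omega
  have b21 : ((21 : Int)) ≠ position := by omega
  have a22 : position ≠ (22 : Int) := by omega
  have b22 : ((22 : Int)) ≠ position := by omega
  have a23 : position ≠ (23 : Int) := by omega
  have b23 : ((23 : Int)) ≠ position := by omega
  unfold would_complete_mill_py would_complete_mill_py_alt
  rw [pvMillIndex_eq]
  simp [pvLoopA, pvMills, PySem.Dict.getD_eq_get?_getD, PySem.Dict.get?, beq_eq_decide, a0, b0, a1, b1, a2, b2, a3, b3, a4, b4, a5, b5, a6, b6, a7, b7, a8, b8, a9, b9, a10, b10, a11, b11, a12, b12, a13, b13, a14, b14, a15, b15, a16, b16, a17, b17, a18, b18, a19, b19, a20, b20, a21, b21, a22, b22, a23, b23]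

-- ===== VERDICT (by name: the statement is the Claim_ definition above) =====
set_option maxRecDepth 8192 in
theorem would_complete_mill_py_spec : Claim_equal_would_complete_mill_py := by
  intro board position color _ hpre
  unfold Spec_would_complete_mill_py
  by_cases h : 0 ≤ position ∧ position < 24
  · obtain ⟨h1, h2⟩ := h
    unfold would_complete_mill_py would_complete_mill_py_alt
    rw [pvMillIndex_eq]
    interval_cases position <;>
      simp [pvLoopA, pvMills, PySem.Dict.getD_eq_get?_getD, PySem.Dict.get?, beq_eq_decide]
  · exact pv_out_of_range board position color h
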